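-- pv_equiv track=rewrite | github.com/juanesarango/bioinformatics-course | algorithms.py | d_dna_string
-- ===== SOURCE A (Python) =====
-- def hamming_distance(text_p, text_q):
--     """Returns the hamming distance between 2 segments.
--     This distance is the total sum of mismatches for eachj position
--     `i` if `p[i] != q[i]`.
--     """
--     if len(text_p) != len(text_q):
--         return -1
--     return sum([text_p[i] != text_q[i] for i in range(len(text_p))])
--
-- def d_dna_string(pattern, dna_string):
--     """Minimum hamming distance of the pattern with a
--     k-mer found in the DNA string.
--     """
--     min_kmer = ''
--     min_distance = len(dna_string)
--     for i in range(len(dna_string) - len(pattern) + 1):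
--         kmer = dna_string[i:i + len(pattern)]
--         distance = hamming_distance(kmer, pattern)
--         if distance < min_distance:
--             min_distance = distance
--             min_kmer = kmer
--     return min_distance, min_kmer
-- ===== SOURCE B (Python) =====
-- def d_dna_string(pattern, dna_string):
--     """Minimum hamming distance of the pattern with a k-mer found in the
--     DNA string.  Column-wise: one mismatch-count array over all windows,
--     accumulated per pattern position, then a single min/index scan --
--     no per-window slicing or re-scanning."""
--     n, k = len(dna_string), len(pattern)
--     m = n - k + 1
--     if m <= 0:
--         return n, ''
--     counts = [0] * m
--     for j, c in enumerate(pattern):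
--         for i in range(m):
--             if dna_string[i + j] != c:
--                 counts[i] += 1
--     best = min(counts)
--     i = counts.index(best)
--     return best, dna_string[i:i + k]
-- ===== Notes on version B (the rewrite author's own statement) =====
-- stated objective: alternative
-- what changed: Instead of slicing out every window and calling a per-window hamming_distance helper, B interchanges the loops: it accumulates one all-window mismatch-count array column-by-column over the pattern positions, then picks the first minimal count with min/index; same O(n*k) cost, no slicing and no per-window rescan.
-- intended difference: When pattern and dna_string have equal nonzero length and differ at every position, A's min_distance is initialized to len(dna_string) so the single window never beats it and A returns (n, '') with an empty k-mer, while B returns (n, dna_string), the actual closest k-mer, which is what the function's docstring promises. — e.g. on d_dna_string("A", "C"): A returns (1, ""), B returns (1, "C")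
import Mathlib
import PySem

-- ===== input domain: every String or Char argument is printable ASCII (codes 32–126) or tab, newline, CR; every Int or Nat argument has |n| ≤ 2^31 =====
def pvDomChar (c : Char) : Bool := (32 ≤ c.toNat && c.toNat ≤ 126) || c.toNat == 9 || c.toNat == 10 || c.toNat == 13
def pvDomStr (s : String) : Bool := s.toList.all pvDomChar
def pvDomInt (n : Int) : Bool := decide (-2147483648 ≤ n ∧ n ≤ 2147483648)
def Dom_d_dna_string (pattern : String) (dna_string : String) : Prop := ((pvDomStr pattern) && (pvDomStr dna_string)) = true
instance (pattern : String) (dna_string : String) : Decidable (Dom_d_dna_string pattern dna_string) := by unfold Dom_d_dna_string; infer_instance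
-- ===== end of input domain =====

-- B replaces A's per-window slice-and-rescan Hamming computation by a loop interchange: one all-window
-- mismatch-count array accumulated column-by-column over the pattern, then a single min/index scan (alternative,
-- same cost); on equal-length all-mismatch inputs A returns an empty k-mer (its sentinel init) while B returns the real one (D_ below).


-- ===== PORT A =====
-- helper: hamming_distance (over the strings' character lists; indices are always in range here)
def hamming_distance (text_p : List Char) (text_q : List Char) : Int :=
  if text_p.length ≠ text_q.length then -1
  else ((PySem.List.pyRange 0 (text_p.length : Int) 1).map
        (fun i => if PySem.List.pyGetD text_p i ' ' ≠ PySem.List.pyGetD text_q i ' ' then (1 : Int) else 0)).sum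

def d_dna_string (pattern : String) (dna_string : String) : Int × String :=
  let p := pattern.toList
  let s := dna_string.toList
  let r := (PySem.List.pyRange 0 ((s.length : Int) - (p.length : Int) + 1) 1).foldl
    (fun (st : Int × List Char) i =>
      let kmer := PySem.List.slice s (some i) (some (i + (p.length : Int)))
      let distance := hamming_distance kmer p
      if distance < st.1 then (distance, kmer) else st)
    ((s.length : Int), ([] : List Char))
  (r.1, String.ofList r.2)

-- ===== PORT B =====
def d_dna_string_alt (pattern : String) (dna_string : String) : Int × String :=
  let p := pattern.toList
  let s := dna_string.toList
  let n : Int := (s.length : Int)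
  let k : Int := (p.length : Int)
  let m : Int := n - k + 1
  if m ≤ 0 then (n, "") else
    let counts : List Int :=
      (PySem.List.enumerate p).foldl (fun cs jc =>
        (PySem.List.pyRange 0 m 1).foldl (fun cs i =>
          if PySem.List.pyGetD s (i + jc.1) ' ' ≠ jc.2 then
            PySem.List.pySetD cs i (PySem.List.pyGetD cs i 0 + 1)
          else cs) cs)
        (List.replicate m.toNat 0)
    let best : Int := (PySem.List.min? counts (fun x => x)).getD 0   -- counts is nonempty (m > 0)
    let i : Int := (((PySem.List.index? counts best).getD 0 : Nat) : Int)  -- best ∈ counts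
    (best, String.ofList (PySem.List.slice s (some i) (some (i + k))))

-- ===== PRECONDITION & SPEC =====
-- On equal-length (nonzero) all-mismatch inputs A returns (len(dna_string), '') — the empty string is its
-- untouched sentinel — while B returns (len(dna_string), dna_string), the actual closest k-mer, as intended.
def D_d_dna_string (pattern : String) (dna_string : String) : Prop :=
  pattern.toList.length = dna_string.toList.length ∧ pattern.toList ≠ [] ∧
  ∀ ab ∈ pattern.toList.zip dna_string.toList, ab.1 ≠ ab.2
instance (pattern : String) (dna_string : String) : Decidable (D_d_dna_string pattern dna_string) := by
  unfold D_d_dna_string; infer_instance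

def Spec_d_dna_string (pattern : String) (dna_string : String) (out : Int × String) : Prop :=
  ¬ D_d_dna_string pattern dna_string → out = d_dna_string_alt pattern dna_string
instance (pattern : String) (dna_string : String) (out : Int × String) : Decidable (Spec_d_dna_string pattern dna_string out) := by
  unfold Spec_d_dna_string; infer_instance

def pvDiffWitness_d_dna_string : String × String := ("A", "C")
def pvDiffWitnessOut_d_dna_string : (Int × String) × (Int × String) := ((1, ""), (1, "C"))

-- ===== CLAIM (what is proved, stated in full; the proofs are below) =====
def Claim_unchanged_d_dna_string : Prop := ∀ (pattern : String) (dna_string : String), Dom_d_dna_string pattern dna_string → Spec_d_dna_string pattern dna_string (d_dna_string pattern dna_string)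
def Claim_changed_d_dna_string : Prop := Dom_d_dna_string (pvDiffWitness_d_dna_string.1) (pvDiffWitness_d_dna_string.2) ∧ D_d_dna_string (pvDiffWitness_d_dna_string.1) (pvDiffWitness_d_dna_string.2) ∧ d_dna_string (pvDiffWitness_d_dna_string.1) (pvDiffWitness_d_dna_string.2) = pvDiffWitnessOut_d_dna_string.1 ∧ d_dna_string_alt (pvDiffWitness_d_dna_string.1) (pvDiffWitness_d_dna_string.2) = pvDiffWitnessOut_d_dna_string.2 ∧ pvDiffWitnessOut_d_dna_string.1 ≠ pvDiffWitnessOut_d_dna_string.2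
def Claim_exact_d_dna_string : Prop := ∀ (pattern : String) (dna_string : String), Dom_d_dna_string pattern dna_string → D_d_dna_string pattern dna_string → d_dna_string pattern dna_string ≠ d_dna_string_alt pattern dna_string

-- ===== LEMMAS AND PROOFS =====

-- mismatch count of window i: number of positions j < |p| with p[j] != s[i+j]
def misCnt (p s : List Char) (i : Nat) : Nat :=
  (List.range p.length).countP (fun j => !(p.getD j ' ' == s.getD (i + j) ' '))

-- partial mismatch count: only the first jt pattern columns accumulated
def partMis (p s : List Char) (jt i : Nat) : Nat :=
  (List.range jt).countP (fun j => !(p.getD j ' ' == s.getD (i + j) ' '))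

-- window i of the DNA string
def winF (p s : List Char) (i : Nat) : List Char := (s.drop i).take p.length

-- indexing/setting an array that is (List.range m).map g
theorem mapRange_getD (m : Nat) (g : Nat → Int) (a : Nat) (ha : a < m) :
    ((List.range m).map g).getD a 0 = g a := by
  rw [List.getD_eq_getElem?_getD]
  simp [ha]

theorem mapRange_set (m : Nat) (g : Nat → Int) (a : Nat) (ha : a < m) (v : Int) :
    ((List.range m).map g).set a v = (List.range m).map (fun i => if i = a then v else g i) := by
  apply List.ext_getElem
  · simp
  · intro j h1 h2
    have hj : j < m := by simpa using h2
    simp only [List.getElem_set, List.getElem_map, List.getElem_range]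
    by_cases h : a = j <;> simp [h, eq_comm]

-- one column of B's accumulation: a guarded += over distinct in-range indices
theorem rowFold (m : Nat) (q : Nat → Prop) [DecidablePred q] :
    ∀ (J : List Nat), J.Nodup → (∀ i ∈ J, i < m) → ∀ g : Nat → Int,
    J.foldl (fun cs i => if q i then
        PySem.List.pySetD cs ((i : Nat) : Int) (PySem.List.pyGetD cs ((i : Nat) : Int) 0 + 1)
      else cs) ((List.range m).map g)
    = (List.range m).map (fun i => g i + if i ∈ J ∧ q i then 1 else 0) := by
  intro J
  induction J with
  | nil => intro _ _ g; simp
  | cons i J' ih =>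
    intro hnd hin g
    have hi : i ∉ J' := (List.nodup_cons.mp hnd).1
    have hnd' : J'.Nodup := (List.nodup_cons.mp hnd).2
    have him : i < m := hin i List.mem_cons_self
    simp only [List.foldl_cons]
    by_cases hq : q i
    · have hbr : (if q i then
          PySem.List.pySetD ((List.range m).map g) ((i : Nat) : Int)
            (PySem.List.pyGetD ((List.range m).map g) ((i : Nat) : Int) 0 + 1)
          else (List.range m).map g)
          = (List.range m).map (fun i' => if i' = i then g i + 1 else g i') := by
        rw [if_pos hq, PySem.List.pyGetD_natCast, PySem.List.pySetD_natCast,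
            mapRange_getD m g i him, mapRange_set m g i him]
      rw [hbr, ih hnd' (fun x hx => hin x (List.mem_cons_of_mem _ hx))]
      apply List.map_congr_left
      intro i' _
      by_cases he : i' = i
      · subst he
        rw [if_pos rfl, if_neg (fun hc => hi hc.1), if_pos ⟨List.mem_cons_self, hq⟩]
        ring
      · rw [if_neg he]
        congr 1
        by_cases hm' : i' ∈ J' <;> by_cases hq' : q i' <;>
          simp [List.mem_cons, he, hm', hq']
    · have hbr : (if q i then
          PySem.List.pySetD ((List.range m).map g) ((i : Nat) : Int)
            (PySem.List.pyGetD ((List.range m).map g) ((i : Nat) : Int) 0 + 1)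
          else (List.range m).map g) = (List.range m).map g := if_neg hq
      rw [hbr, ih hnd' (fun x hx => hin x (List.mem_cons_of_mem _ hx))]
      apply List.map_congr_left
      intro i' _
      congr 1
      by_cases he : i' = i
      · subst he
        simp [List.mem_cons, hq]
      · by_cases hm' : i' ∈ J' <;> by_cases hq' : q i' <;>
          simp [List.mem_cons, he, hm', hq']

-- B's accumulation loop as a fold over Nat column indices
def colB (p s : List Char) : List Int → Nat → List Int :=
  fun cs j => (List.range (s.length - p.length + 1)).foldl
    (fun cs i => if s.getD (i + j) ' ' ≠ p.getD j ' ' then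
        PySem.List.pySetD cs ((i : Nat) : Int) (PySem.List.pyGetD cs ((i : Nat) : Int) 0 + 1)
      else cs) cs

theorem partMis_succ (p s : List Char) (jt i : Nat) :
    partMis p s (jt + 1) i = partMis p s jt i
      + (if ¬ s.getD (i + jt) ' ' = p.getD jt ' ' then 1 else 0) := by
  unfold partMis
  rw [List.range_succ, List.countP_append]
  congr 1
  simp only [List.countP_cons, List.countP_nil]
  generalize p.getD jt ' ' = a
  generalize s.getD (i + jt) ' ' = b
  by_cases h : a = b
  · simp [h]
  · simp [h, Ne.symm h]

theorem colB_fold (p s : List Char) : ∀ jt, jt ≤ p.length →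
    (List.range jt).foldl (colB p s)
        ((List.range (s.length - p.length + 1)).map (fun _ => (0 : Int)))
      = (List.range (s.length - p.length + 1)).map (fun i => ((partMis p s jt i : Nat) : Int)) := by
  intro jt
  induction jt with
  | zero => intro _; simp [partMis]
  | succ jt ih =>
    intro ht
    rw [show List.range (jt + 1) = List.range jt ++ [jt] from List.range_succ,
        List.foldl_append, ih (by omega), List.foldl_cons, List.foldl_nil]
    unfold colB
    rw [rowFold (s.length - p.length + 1) (fun i => s.getD (i + jt) ' ' ≠ p.getD jt ' ')
          (List.range (s.length - p.length + 1)) List.nodup_range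
          (fun x hx => List.mem_range.mp hx)]
    apply List.map_congr_left
    intro i hi
    rw [partMis_succ]
    congr 1
    by_cases h : s.getD (i + jt) ' ' = p.getD jt ' ' <;> simp [h, hi]

-- A's per-window hamming distance in terms of misCnt
theorem hamming_win (p s : List Char) (i : Nat) (h : i + p.length ≤ s.length) :
    hamming_distance (winF p s i) p = ((misCnt p s i : Nat) : Int) := by
  have hlen : (winF p s i).length = p.length := by
    unfold winF; simp; omega
  unfold hamming_distance
  rw [if_neg (by simp [hlen]), hlen, PySem.List.pyRange_zero_nat, List.map_map]
  have hmap : (List.range p.length).map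
        ((fun i_1 => if PySem.List.pyGetD (winF p s i) i_1 ' ' ≠ PySem.List.pyGetD p i_1 ' ' then (1 : Int) else 0) ∘ fun k => ((k : Nat) : Int))
      = (List.range p.length).map (fun j => if (!(p.getD j ' ' == s.getD (i + j) ' ')) = true then (1 : Int) else 0) := by
    apply List.map_congr_left
    intro j hj
    have hjK : j < p.length := List.mem_range.mp hj
    have hw : (winF p s i).getD j ' ' = s.getD (i + j) ' ' := by
      unfold winF
      rw [List.getD_eq_getElem?_getD, List.getD_eq_getElem?_getD, List.getElem?_take, if_pos hjK,
          List.getElem?_drop]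
    simp only [Function.comp, PySem.List.pyGetD_natCast, hw]
    generalize p.getD j ' ' = a
    generalize s.getD (i + j) ' ' = b
    by_cases he : a = b
    · subst he
      simp
    · rw [if_pos (fun hh => he hh.symm), if_pos (by simp [he])]
  rw [hmap, PySem.List.sum_map_ite_one_zero]
  rfl

-- a matching position bounds the mismatch count strictly below |p|
theorem misCnt_lt_of_match (p s : List Char) (i : Nat)
    (hx : ∃ j, j < p.length ∧ p.getD j ' ' = s.getD (i + j) ' ') :
    misCnt p s i < p.length := by
  obtain ⟨j, hj, hje⟩ := hx
  have h0 := List.length_eq_countP_add_countP (l := List.range p.length)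
    (p := fun j => p.getD j ' ' == s.getD (i + j) ' ')
  simp only [List.length_range] at h0
  have h1 : 0 < (List.range p.length).countP (fun j => p.getD j ' ' == s.getD (i + j) ' ') := by
    apply List.countP_pos_iff.mpr
    exact ⟨j, List.mem_range.mpr hj, by simpa only [beq_iff_eq] using hje⟩
  have h2 : misCnt p s i
      = (List.range p.length).countP (fun a => decide ¬ ((p.getD a ' ' == s.getD (i + a) ' ') = true)) := by
    unfold misCnt
    apply List.countP_congr
    intro x _
    simp
  omega

theorem misCnt_le (p s : List Char) (i : Nat) : misCnt p s i ≤ p.length := by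
  have := List.countP_le_length (l := List.range p.length)
    (p := fun j => !(p.getD j ' ' == s.getD (i + j) ' '))
  simpa [misCnt] using this

-- the strict-improvement scan reaches exactly the first minimum
def stepF (F : Nat → Int) (G : Nat → List Char) : (Int × List Char) → Nat → (Int × List Char) :=
  fun st i => if F i < st.1 then (F i, G i) else st

theorem scanGo (F : Nat → Int) (G : Nat → List Char) (i0 : Nat) :
    ∀ (cnt a : Nat) (st : Int × List Char),
    (∀ i, i < a + cnt → F i0 ≤ F i) → (∀ j, j < i0 → F i0 < F j) → i0 < a + cnt →
    ((i0 < a ∧ st = (F i0, G i0)) ∨ (a ≤ i0 ∧ F i0 < st.1)) →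
    (List.range' a cnt).foldl (stepF F G) st = (F i0, G i0) := by
  intro cnt
  induction cnt with
  | zero =>
    intro a st _ _ hlt hinv
    rcases hinv with ⟨_, h⟩ | ⟨h, _⟩ <;> [exact h; omega]
  | succ c ih =>
    intro a st hlow hstrict hlt hinv
    rw [List.range'_succ, List.foldl_cons]
    apply ih (a + 1) _ (fun i hi => hlow i (by omega)) hstrict (by omega)
    rcases hinv with ⟨ha, hst⟩ | ⟨ha, hst⟩
    · left
      refine ⟨by omega, ?_⟩
      rw [hst]
      simp only [stepF]
      rw [if_neg (not_lt.mpr (hlow a (by omega)))]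
    · by_cases he : a = i0
      · subst he
        left
        refine ⟨by omega, ?_⟩
        simp only [stepF]
        rw [if_pos hst]
      · right
        refine ⟨by omega, ?_⟩
        simp only [stepF]
        split
        · exact hstrict a (by omega)
        · exact hst

-- ===== MAIN =====

theorem A_fold (p s : List Char) (hK : p.length ≤ s.length) :
    (PySem.List.pyRange 0 ((s.length : Int) - (p.length : Int) + 1) 1).foldl
      (fun (st : Int × List Char) i =>
        if hamming_distance (PySem.List.slice s (some i) (some (i + (p.length : Int)))) p < st.1
        then (hamming_distance (PySem.List.slice s (some i) (some (i + (p.length : Int)))) p,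
              PySem.List.slice s (some i) (some (i + (p.length : Int))))
        else st)
      ((s.length : Int), ([] : List Char))
    = (List.range' 0 (s.length - p.length + 1)).foldl
        (stepF (fun i => ((misCnt p s i : Nat) : Int)) (winF p s))
        ((s.length : Int), ([] : List Char)) := by
  have hb : (s.length : Int) - (p.length : Int) + 1 = ((s.length - p.length + 1 : Nat) : Int) := by
    omega
  rw [hb, PySem.List.pyRange_zero_nat, List.foldl_map, ← List.range_eq_range']
  apply PySem.List.foldl_congr_mem
  intro st i hi
  have hiN : i < s.length - p.length + 1 := List.mem_range.mp hi
  have hsl : PySem.List.slice s (some ((i : Nat) : Int)) (some (((i : Nat) : Int) + ((p.length : Nat) : Int)))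
      = winF p s i := PySem.List.slice_natCast_add s i p.length
  simp only [stepF, hsl, hamming_win p s i (by omega)]

theorem counts_eq (p s : List Char) (hK : p.length ≤ s.length) :
    (PySem.List.enumerate p).foldl (fun cs jc =>
        (PySem.List.pyRange 0 ((s.length : Int) - (p.length : Int) + 1) 1).foldl (fun cs i =>
          if PySem.List.pyGetD s (i + jc.1) ' ' ≠ jc.2 then
            PySem.List.pySetD cs i (PySem.List.pyGetD cs i 0 + 1)
          else cs) cs)
      (List.replicate ((s.length : Int) - (p.length : Int) + 1).toNat 0)
    = (List.range (s.length - p.length + 1)).map (fun i => ((misCnt p s i : Nat) : Int)) := by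
  have hrep : (List.replicate ((s.length : Int) - (p.length : Int) + 1).toNat (0 : Int))
      = (List.range (s.length - p.length + 1)).map (fun _ => (0 : Int)) := by
    rw [List.map_const', List.length_range,
        show ((s.length : Int) - (p.length : Int) + 1).toNat = s.length - p.length + 1 from by omega]
  have hb : (s.length : Int) - (p.length : Int) + 1 = ((s.length - p.length + 1 : Nat) : Int) := by
    omega
  rw [hrep, hb, PySem.List.enumerate_eq_map_pyRange p ' ', PySem.List.len_eq,
      PySem.List.pyRange_zero_nat, PySem.List.pyRange_zero_nat, List.map_map, List.foldl_map]
  refine Eq.trans (PySem.List.foldl_congr_mem _ _ (colB p s) _ ?_) ?_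
  · intro acc j hj
    simp only [Function.comp, colB, PySem.List.pyGetD_natCast, List.foldl_map]
    apply PySem.List.foldl_congr_mem
    intro cs i _
    have hc : ((i : Nat) : Int) + ((j : Nat) : Int) = ((i + j : Nat) : Int) := by push_cast; ring
    rw [hc, PySem.List.pyGetD_natCast]
  · rw [colB_fold p s p.length (le_refl _)]
    rfl

theorem d_dna_string_main : ∀ (pattern : String) (dna_string : String),
    ¬ D_d_dna_string pattern dna_string →
    d_dna_string pattern dna_string = d_dna_string_alt pattern dna_string := by
  intro pattern dna hnd
  by_cases hKN : pattern.toList.length ≤ dna.toList.length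
  case neg =>
    -- no window at all: A's range is empty, B takes its early-exit branch
    unfold d_dna_string d_dna_string_alt
    simp only
    rw [PySem.List.pyRange_one_eq_nil (by omega), if_pos (by omega)]
    simp
  case pos =>
    by_cases hN0 : dna.toList.length = 0
    · -- empty dna (hence empty pattern): both return (0, "")
      have hdna : dna = "" := by
        have h1 : dna.toList = [] := List.length_eq_zero_iff.mp hN0
        have := congrArg String.ofList h1
        rwa [String.ofList_toList] at this
      have hpat : pattern = "" := by
        have h1 : pattern.toList = [] := List.length_eq_zero_iff.mp (by omega)
        have := congrArg String.ofList h1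
        rwa [String.ofList_toList] at this
      subst hdna hpat
      decide
    · set p := pattern.toList with hp
      set s := dna.toList with hs
      set mN := s.length - p.length + 1 with hmN
      set M := (List.range mN).map (fun i => ((misCnt p s i : Nat) : Int)) with hM
      have hMlen : M.length = mN := by rw [hM]; simp
      have hMne : M ≠ [] := by
        intro h
        rw [h] at hMlen
        simp only [List.length_nil] at hMlen
        omega
      obtain ⟨b, hbmin⟩ : ∃ b, PySem.List.min? M (fun x => x) = some b := by
        cases h : PySem.List.min? M (fun x => x) with
        | none => exact absurd ((PySem.List.min?_eq_none_iff M _).mp h) hMne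
        | some b => exact ⟨b, rfl⟩
      have hble : ∀ y ∈ M, b ≤ y := by
        have := PySem.List.min?_isMin hbmin
        simpa using this
      obtain ⟨i0, hidx⟩ : ∃ i0, PySem.List.index? M b = some i0 := by
        cases h : PySem.List.index? M b with
        | none =>
          have hmem : b ∈ M := PySem.List.min?_mem hbmin
          have h2 := (PySem.List.index?_isSome_iff M b).mpr hmem
          rw [h] at h2
          simp at h2
        | some i0 => exact ⟨i0, rfl⟩
      obtain ⟨hi0len, hMi0, hfirst⟩ := PySem.List.getElem_of_index?_eq_some hidx
      have hi0m : i0 < mN := by omega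
      have hgetM : ∀ (j : Nat) (hj : j < mN), M[j]'(by omega) = ((misCnt p s j : Nat) : Int) := by
        intro j hj
        simp [hM]
      have hb' : b = ((misCnt p s i0 : Nat) : Int) := by
        rw [← hMi0, hgetM i0 hi0m]
      have Hlow : ∀ i, i < mN → misCnt p s i0 ≤ misCnt p s i := by
        intro i hi
        have hmem : M[i]'(by omega) ∈ M := List.getElem_mem _
        have := hble _ hmem
        rw [hgetM i hi, hb'] at this
        exact_mod_cast this
      have Hstrict : ∀ j, j < i0 → misCnt p s i0 < misCnt p s j := by
        intro j hj
        have hne := hfirst j hj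
        have hle := Hlow j (by omega)
        rw [hgetM j (by omega), hb'] at hne
        have : misCnt p s j ≠ misCnt p s i0 := by
          intro h
          exact hne (by rw [h])
        omega
      -- the best distance beats A's initial sentinel (here ¬D_ matters)
      have hb0 : ((misCnt p s i0 : Nat) : Int) < (s.length : Int) := by
        by_cases hKeq : p.length = s.length
        · -- single window; ¬D_ gives a matching position
          have hpne : p ≠ [] := by
            intro h
            rw [h] at hKeq
            simp at hKeq
            omega
          have hx : ∃ ab ∈ p.zip s, ab.1 = ab.2 := by
            by_contra hno
            push_neg at hno
            exact hnd ⟨hKeq, hpne, hno⟩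
          obtain ⟨ab, habm, habe⟩ := hx
          obtain ⟨j, hj, hjv⟩ := List.mem_iff_getElem.mp habm
          have hjp : j < p.length := by
            have := hj
            simp [List.length_zip] at this
            omega
          have hjs : j < s.length := by omega
          have h1 : misCnt p s 0 < p.length := by
            apply misCnt_lt_of_match
            refine ⟨j, hjp, ?_⟩
            have := List.getElem_zip (l := p) (l' := s) (i := j) (h := hj)
            rw [this] at hjv
            have hpj : p[j] = ab.1 := congrArg Prod.fst hjv
            have hsj : s[j] = ab.2 := congrArg Prod.snd hjv
            simp only [Nat.zero_add]
            rw [List.getD_eq_getElem p ' ' hjp, List.getD_eq_getElem s ' ' hjs, hpj, hsj, habe]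
          have h2 := Hlow 0 (by omega)
          omega
        · -- strictly more windows: distance ≤ |p| < |s|
          have h1 := misCnt_le p s i0
          omega
      -- put the two sides together
      unfold d_dna_string d_dna_string_alt
      simp only
      rw [← hp, ← hs]
      rw [if_neg (by omega), A_fold p s hKN, counts_eq p s hKN, ← hmN, ← hM, hbmin]
      simp only [Option.getD_some]
      rw [hidx]
      simp only [Option.getD_some]
      rw [scanGo (fun i => ((misCnt p s i : Nat) : Int)) (winF p s) i0 mN 0
            ((s.length : Int), ([] : List Char))
            (by intro i hi; beta_reduce; have := Hlow i (by omega); omega)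
            (by intro j hj; beta_reduce; have := Hstrict j hj; omega)
            (by omega)
            (Or.inr ⟨by omega, hb0⟩)]
      have hsl : PySem.List.slice s (some ((i0 : Nat) : Int)) (some (((i0 : Nat) : Int) + ((p.length : Nat) : Int)))
          = winF p s i0 := PySem.List.slice_natCast_add s i0 p.length
      rw [hsl, hb']

-- ===== VERDICT (by name: the statement is the Claim_ definition above) =====
theorem d_dna_string_spec : Claim_unchanged_d_dna_string := by
  intro pattern dna _ hnd
  exact d_dna_string_main pattern dna hnd

theorem d_dna_string_changed : Claim_changed_d_dna_string := by
  unfold Claim_changed_d_dna_string; decide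

theorem d_dna_string_tight : Claim_exact_d_dna_string := by
  intro pattern dna _ hD
  obtain ⟨hlen, hpne, hmis⟩ := hD
  set p := pattern.toList with hp
  set s := dna.toList with hs
  have hKN : p.length ≤ s.length := le_of_eq hlen
  have hsne : s ≠ [] := by
    intro h
    rw [h] at hlen
    simp at hlen
    exact hpne hlen
  have hm0 : misCnt p s 0 = p.length := by
    have hall : ∀ j ∈ List.range p.length, (!(p.getD j ' ' == s.getD (0 + j) ' ')) = true := by
      intro j hj
      have hjp : j < p.length := List.mem_range.mp hj
      have hjs : j < s.length := by omega
      have hmem : (p[j], s[j]) ∈ p.zip s := by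
        have := List.getElem_zip (l := p) (l' := s) (i := j)
          (h := by rw [List.length_zip]; omega)
        rw [← this]
        exact List.getElem_mem _
      have hne := hmis _ hmem
      simp only [ne_eq] at hne
      simp only [Nat.zero_add, List.getD_eq_getElem p ' ' hjp, List.getD_eq_getElem s ' ' hjs]
      simpa using hne
    have h1 := List.countP_eq_length.mpr hall
    simpa [misCnt] using h1
  have hA : d_dna_string pattern dna = ((s.length : Int), "") := by
    unfold d_dna_string
    simp only
    rw [← hp, ← hs, A_fold p s hKN, show s.length - p.length + 1 = 1 from by omega,
        List.range'_one, List.foldl_cons, List.foldl_nil]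
    simp only [stepF, hm0]
    rw [if_neg (by simp; omega)]
  have hB : d_dna_string_alt pattern dna = ((s.length : Int), String.ofList s) := by
    unfold d_dna_string_alt
    simp only
    rw [← hp, ← hs]
    rw [if_neg (by omega), counts_eq p s hKN,
        show s.length - p.length + 1 = 1 from by omega,
        show List.range 1 = [0] from rfl]
    simp only [List.map_cons, List.map_nil, hm0]
    rw [PySem.List.min?_id_cons, List.foldl_nil]
    simp only [Option.getD_some]
    rw [PySem.List.index?_cons_self]
    simp only [Option.getD_some, Nat.cast_zero]
    have hsl : PySem.List.slice s (some ((0 : Nat) : Int)) (some (((0 : Nat) : Int) + ((p.length : Nat) : Int)))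
        = (s.drop 0).take p.length := PySem.List.slice_natCast_add s 0 p.length
    simp only [Nat.cast_zero] at hsl
    rw [hsl]
    rw [List.drop_zero, hlen, List.take_length, Prod.mk.injEq]
    exact ⟨by omega, rfl⟩
  rw [hA, hB]
  intro h
  have h2 := congrArg Prod.snd h
  simp only at h2
  have h3 := congrArg String.toList h2
  rw [String.toList_ofList] at h3
  exact hsne (by simpa using h3.symm)
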